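-- pv_equiv track=rewrite | github.com/kuznetsovvj/education | algorithms/codeforces/1850d.py | check
-- ===== SOURCE A (Python) =====
-- def check(seq, k):
--     seq.sort()
--     m, c = 1, 1
--     for i in range(1, len(seq)):
--         if seq[i] - seq[i-1] <= k:
--             c += 1
--         else:
--             m = max(m, c)
--             c = 1
--     m = max(m, c)
--     return len(seq) - m
-- ===== SOURCE B (Python) =====
-- def check(seq, k):
--     seq.sort()
--     n = len(seq)
--     breaks = [i for i in range(1, n) if seq[i] - seq[i - 1] > k]
--     bounds = [0] + breaks + [n]
--     m = max([1] + [b - a for a, b in zip(bounds, bounds[1:])])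
--     return n - m
-- ===== Notes on version B (the rewrite author's own statement) =====
-- stated objective: alternative
-- what changed: Instead of carrying a (best, current-run) counter pair through the scan, B sorts, collects the break positions where the gap exceeds k, and takes the longest segment as the maximum difference of consecutive boundaries.
import Mathlib
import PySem

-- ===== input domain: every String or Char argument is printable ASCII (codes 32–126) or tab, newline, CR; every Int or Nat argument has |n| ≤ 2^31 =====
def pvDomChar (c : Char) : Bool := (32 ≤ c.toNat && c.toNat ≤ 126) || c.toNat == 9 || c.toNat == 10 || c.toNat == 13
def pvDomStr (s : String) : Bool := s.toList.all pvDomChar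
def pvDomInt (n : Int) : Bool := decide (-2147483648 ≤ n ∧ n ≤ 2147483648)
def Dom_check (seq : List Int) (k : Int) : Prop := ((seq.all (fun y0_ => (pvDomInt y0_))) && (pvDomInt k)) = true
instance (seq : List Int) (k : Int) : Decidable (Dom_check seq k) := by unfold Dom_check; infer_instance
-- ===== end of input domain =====

-- B replaces A's (best, current-run) counter scan by break positions + maximum boundary difference;
-- both Pythons sort seq in place (same mutation); the equivalence proved is about the return value.

-- ===== PORT A =====
def check (seq : List Int) (k : Int) : Int :=
  let s := PySem.List.sorted seq (fun x => x) false
  let st := (PySem.List.pyRange 1 (s.length : Int) 1).foldl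
    (fun (p : Int × Int) i =>
      if PySem.List.pyGetD s i 0 - PySem.List.pyGetD s (i - 1) 0 ≤ k
      then (p.1, p.2 + 1) else (max p.1 p.2, 1)) (1, 1)
  (s.length : Int) - max st.1 st.2

-- ===== PORT B =====
def check_alt (seq : List Int) (k : Int) : Int :=
  let s := PySem.List.sorted seq (fun x => x) false
  let n : Int := (s.length : Int)
  let breaks := (PySem.List.pyRange 1 n 1).filter
    (fun i => decide (PySem.List.pyGetD s i 0 - PySem.List.pyGetD s (i - 1) 0 > k))
  let bounds := 0 :: (breaks ++ [n])
  let m := ((bounds.zip (bounds.drop 1)).map (fun p => p.2 - p.1)).foldl max 1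
  n - m

-- ===== PRECONDITION & SPEC =====
def Spec_check (seq : List Int) (k : Int) (out : Int) : Prop := out = check_alt seq k
instance (seq : List Int) (k : Int) (out : Int) : Decidable (Spec_check seq k out) := by unfold Spec_check; infer_instance

-- ===== CLAIM (what is proved, stated in full; the proofs are below) =====
def Claim_equal_check : Prop := ∀ (seq : List Int) (k : Int), Dom_check seq k → Spec_check seq k (check seq k)

-- ===== LEMMAS AND PROOFS =====

/-- consecutive differences starting from a previous boundary `p` -/
def diffsFrom (p : Int) : List Int → List Int
  | [] => []
  | x :: xs => (x - p) :: diffsFrom x xs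

lemma zip_diffs (xs : List Int) (p : Int) :
    (((p :: xs).zip ((p :: xs).drop 1)).map (fun q => q.2 - q.1)) = diffsFrom p xs := by
  induction xs generalizing p with
  | nil => rfl
  | cons x t ih => simpa [diffsFrom, List.zip] using ih x

lemma key (t : Int → Prop) [DecidablePred t] : ∀ (n : Nat) (a b m c p : Int), (b - a).toNat = n → a ≤ b → c = a - p →
    (let st := (PySem.List.pyRange a b 1).foldl
        (fun (q : Int × Int) i => if t i then (q.1, q.2 + 1) else (max q.1 q.2, 1)) (m, c);
      max st.1 st.2)
    = (diffsFrom p (((PySem.List.pyRange a b 1).filter (fun i => !decide (t i))) ++ [b])).foldl max m := by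
  intro n
  induction n with
  | zero =>
    intro a b m c p hn hab hc
    have hba : b = a := by omega
    subst hba
    simp [PySem.List.pyRange_one_eq_nil le_rfl, diffsFrom, hc]
  | succ n ih =>
    intro a b m c p hn hab hc
    have hlt : a < b := by omega
    rw [PySem.List.pyRange_one_cons hlt]
    by_cases ht : t a
    · have := ih (a + 1) b m (c + 1) p (by omega) (by omega) (by omega)
      simpa [ht] using this
    · have := ih (a + 1) b (max m c) 1 a (by omega) (by omega) (by omega)
      simp only [List.foldl_cons, List.filter_cons, ht, decide_false, Bool.not_false, if_true, if_false,
        diffsFrom, List.cons_append] at this ⊢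
      rw [this, hc]

-- the two ports test the gap with complementary predicates
lemma filter_pred_eq (s : List Int) (k : Int) :
    (fun i => decide (PySem.List.pyGetD s i 0 - PySem.List.pyGetD s (i - 1) 0 > k))
    = (fun i => !decide (PySem.List.pyGetD s i 0 - PySem.List.pyGetD s (i - 1) 0 ≤ k)) := by
  funext i
  simp [← decide_not, not_le]
  omega

-- ===== VERDICT (by name: the statement is the Claim_ definition above) =====
theorem check_spec : Claim_equal_check := by
  intro seq k _
  unfold Spec_check check check_alt
  simp only []
  set s := PySem.List.sorted seq (fun x => x) false with hs
  rcases Nat.eq_zero_or_pos s.length with h0 | hpos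
  · rw [List.length_eq_zero_iff] at h0
    rw [h0]
    norm_num [PySem.List.pyRange_one_eq_nil]
  · rw [filter_pred_eq s k, zip_diffs,
      key (fun i => PySem.List.pyGetD s i 0 - PySem.List.pyGetD s (i - 1) 0 ≤ k)
        ((s.length : Int) - 1).toNat 1 (s.length : Int) 1 1 0 rfl (by exact_mod_cast hpos)
        (by ring)]
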